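-- pv_equiv track=rewrite | github.com/pantsousis/dbeam | helperClassesTest.py | perQuestionMetrics
-- ===== SOURCE A (Python) =====
-- def perQuestionMetrics(gold_schema_tables_sets, dbeam_tables_selected_sets, topn_tables_selected_sets):
--
--     dbeam = []
--     topn = []
--     output = []
--
--     for i in range(len(gold_schema_tables_sets)):
--         total_correct = 0
--         gold_schema_tables = gold_schema_tables_sets[i]
--         tables_selected = dbeam_tables_selected_sets[i]
--
--         for gold_table in gold_schema_tables:
--             if gold_table in tables_selected:
--                 total_correct += 1
--
--         dbeam.append(total_correct)
--
--     for i in range(len(gold_schema_tables_sets)):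
--         total_correct = 0
--         gold_schema_tables = gold_schema_tables_sets[i]
--         tables_selected = topn_tables_selected_sets[i]
--
--         for gold_table in gold_schema_tables:
--             if gold_table in tables_selected:
--                 total_correct += 1
--
--         topn.append(total_correct)
--
--     for i in range(len(gold_schema_tables_sets)):
--         total_question_tables = len(gold_schema_tables_sets[i])
--         total_dbeam = dbeam[i]
--         total_topn = topn[i]
--         output.append([total_question_tables, total_dbeam, total_topn])
--
--     return output
-- ===== SOURCE B (Python) =====
-- def perQuestionMetrics(gold_schema_tables_sets, dbeam_tables_selected_sets, topn_tables_selected_sets):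
--     output = []
--     for i, gold in enumerate(gold_schema_tables_sets):
--         counts = {}
--         for t in gold:
--             counts[t] = counts.get(t, 0) + 1
--         dbeam_correct = sum(counts.get(t, 0) for t in set(dbeam_tables_selected_sets[i]))
--         topn_correct = sum(counts.get(t, 0) for t in set(topn_tables_selected_sets[i]))
--         output.append([len(gold), dbeam_correct, topn_correct])
--     return output
-- ===== Notes on version B (the rewrite author's own statement) =====
-- stated objective: alternative
-- what changed: Instead of scanning the selected-table list for every gold table (A's nested membership loops, done in three index-based passes), B builds a per-question dictionary of gold-table multiplicities once and sums the looked-up multiplicities over the distinct selected tables, assembling each output row in a single enumerate loop.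
import Mathlib
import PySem

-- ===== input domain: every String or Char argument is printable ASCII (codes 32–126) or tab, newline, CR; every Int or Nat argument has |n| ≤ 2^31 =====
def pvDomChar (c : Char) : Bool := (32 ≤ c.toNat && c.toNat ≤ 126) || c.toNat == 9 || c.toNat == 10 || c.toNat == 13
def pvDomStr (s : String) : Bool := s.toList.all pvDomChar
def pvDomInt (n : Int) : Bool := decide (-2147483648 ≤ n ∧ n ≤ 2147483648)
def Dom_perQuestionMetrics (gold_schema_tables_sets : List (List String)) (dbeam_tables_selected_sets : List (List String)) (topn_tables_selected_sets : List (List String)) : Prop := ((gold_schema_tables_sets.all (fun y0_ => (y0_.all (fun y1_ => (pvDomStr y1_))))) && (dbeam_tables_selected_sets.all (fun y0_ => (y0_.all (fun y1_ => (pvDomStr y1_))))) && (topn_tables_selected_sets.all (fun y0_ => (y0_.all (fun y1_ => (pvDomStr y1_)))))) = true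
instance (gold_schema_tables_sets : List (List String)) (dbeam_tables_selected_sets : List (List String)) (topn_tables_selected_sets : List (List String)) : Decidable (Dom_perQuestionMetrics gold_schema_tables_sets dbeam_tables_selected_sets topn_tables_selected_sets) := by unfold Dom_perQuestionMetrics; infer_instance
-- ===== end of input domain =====

-- B replaces A's per-gold-element membership scans with a per-question multiplicity dictionary
-- (a counter of the gold tables) queried once per distinct selected table (alternative algorithm).
-- ===== PORT A =====
-- Port of A: three index-based passes building dbeam, topn, then output.
def perQuestionMetrics (gold_schema_tables_sets : List (List String)) (dbeam_tables_selected_sets : List (List String)) (topn_tables_selected_sets : List (List String)) : List (List Int) :=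
  let dbeam : List Int :=
    (PySem.List.pyRange 0 (gold_schema_tables_sets.length : Int) 1).foldl (fun acc i =>
      let gold_schema_tables := (PySem.List.pyGet? gold_schema_tables_sets i).getD []
      let tables_selected := (PySem.List.pyGet? dbeam_tables_selected_sets i).getD []
      let total_correct := gold_schema_tables.foldl
        (fun tc gold_table => if tables_selected.contains gold_table then tc + 1 else tc) (0 : Int)
      acc ++ [total_correct]) []
  let topn : List Int :=
    (PySem.List.pyRange 0 (gold_schema_tables_sets.length : Int) 1).foldl (fun acc i =>
      let gold_schema_tables := (PySem.List.pyGet? gold_schema_tables_sets i).getD []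
      let tables_selected := (PySem.List.pyGet? topn_tables_selected_sets i).getD []
      let total_correct := gold_schema_tables.foldl
        (fun tc gold_table => if tables_selected.contains gold_table then tc + 1 else tc) (0 : Int)
      acc ++ [total_correct]) []
  let output : List (List Int) :=
    (PySem.List.pyRange 0 (gold_schema_tables_sets.length : Int) 1).foldl (fun acc i =>
      let total_question_tables : Int := (((PySem.List.pyGet? gold_schema_tables_sets i).getD []).length : Int)
      let total_dbeam := (PySem.List.pyGet? dbeam i).getD 0
      let total_topn := (PySem.List.pyGet? topn i).getD 0
      acc ++ [[total_question_tables, total_dbeam, total_topn]]) []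
  output

-- ===== PORT B =====
-- Port of B: one enumerate loop; per question, build a dict of gold-table multiplicities,
-- then sum the looked-up multiplicities over the distinct selected tables (set(...)).
def perQuestionMetrics_alt (gold_schema_tables_sets : List (List String)) (dbeam_tables_selected_sets : List (List String)) (topn_tables_selected_sets : List (List String)) : List (List Int) :=
  (PySem.List.enumerate gold_schema_tables_sets).foldl (fun output p =>
    let i := p.1
    let gold := p.2
    let counts : PySem.Dict String Int :=
      gold.foldl (fun c tb => c.insert tb (c.getD tb 0 + 1)) PySem.Dict.empty
    let dbeam_correct :=
      (PySem.Set.ofList ((PySem.List.pyGet? dbeam_tables_selected_sets i).getD [])).foldl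
        (fun s tb => s + counts.getD tb 0) (0 : Int)
    let topn_correct :=
      (PySem.Set.ofList ((PySem.List.pyGet? topn_tables_selected_sets i).getD [])).foldl
        (fun s tb => s + counts.getD tb 0) (0 : Int)
    output ++ [[(gold.length : Int), dbeam_correct, topn_correct]]) []

-- ===== PRECONDITION & SPEC =====
-- Pre_ excludes exactly the inputs where A raises IndexError: a dbeam or topn list
-- shorter than the gold list (A indexes both up to len(gold_schema_tables_sets)).
def Pre_perQuestionMetrics (gold_schema_tables_sets : List (List String)) (dbeam_tables_selected_sets : List (List String)) (topn_tables_selected_sets : List (List String)) : Prop :=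
  gold_schema_tables_sets.length ≤ dbeam_tables_selected_sets.length ∧
  gold_schema_tables_sets.length ≤ topn_tables_selected_sets.length
instance (gold_schema_tables_sets : List (List String)) (dbeam_tables_selected_sets : List (List String)) (topn_tables_selected_sets : List (List String)) : Decidable (Pre_perQuestionMetrics gold_schema_tables_sets dbeam_tables_selected_sets topn_tables_selected_sets) := by unfold Pre_perQuestionMetrics; infer_instance
def pvWitness_perQuestionMetrics : List (List String) × List (List String) × List (List String) :=
  ([["a", "b"], ["c"]], [["a"], ["c", "d"]], [["b", "a"], ["e"]])

def Spec_perQuestionMetrics (gold_schema_tables_sets : List (List String)) (dbeam_tables_selected_sets : List (List String)) (topn_tables_selected_sets : List (List String)) (out : List (List Int)) : Prop := out = perQuestionMetrics_alt gold_schema_tables_sets dbeam_tables_selected_sets topn_tables_selected_sets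
instance (gold_schema_tables_sets : List (List String)) (dbeam_tables_selected_sets : List (List String)) (topn_tables_selected_sets : List (List String)) (out : List (List Int)) : Decidable (Spec_perQuestionMetrics gold_schema_tables_sets dbeam_tables_selected_sets topn_tables_selected_sets out) := by unfold Spec_perQuestionMetrics; infer_instance

-- ===== CLAIM (what is proved, stated in full; the proofs are below) =====
def Claim_equal_perQuestionMetrics : Prop := ∀ (gold_schema_tables_sets : List (List String)) (dbeam_tables_selected_sets : List (List String)) (topn_tables_selected_sets : List (List String)), Dom_perQuestionMetrics gold_schema_tables_sets dbeam_tables_selected_sets topn_tables_selected_sets → Pre_perQuestionMetrics gold_schema_tables_sets dbeam_tables_selected_sets topn_tables_selected_sets → Spec_perQuestionMetrics gold_schema_tables_sets dbeam_tables_selected_sets topn_tables_selected_sets (perQuestionMetrics gold_schema_tables_sets dbeam_tables_selected_sets topn_tables_selected_sets)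

-- ===== LEMMAS AND PROOFS =====
theorem sum_map_add' {a : Type} (l : List a) (f g : a -> Int) :
    (l.map (fun x => f x + g x)).sum = (l.map f).sum + (l.map g).sum := by
  induction l with
  | nil => simp
  | cons x l ih => simp [ih]; ring

-- On a duplicate-free list, the indicator sum picks out membership.
theorem sum_indicator_nodup (l : List String) (x : String) (hnd : l.Nodup) :
    (l.map (fun t => if t == x then (1 : Int) else 0)).sum = if x ∈ l then 1 else 0 := by
  induction l with
  | nil => simp
  | cons a l ih =>
    rcases List.nodup_cons.mp hnd with ⟨ha, hnd'⟩
    rw [List.map_cons, List.sum_cons, ih hnd']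
    simp only [List.mem_cons]
    by_cases hax : a = x
    · subst hax; simp [ha]
    · have hxa : ¬ x = a := fun h => hax h.symm
      simp [hax, hxa]

-- Summing gold multiplicities over the distinct selected tables equals
-- counting gold elements that are members of the selection.
theorem counter_sum_eq_count (gold sel : List String) :
    ((PySem.Set.ofList sel).map (fun t => (gold.count t : Int))).sum
      = ((gold.countP sel.contains : Nat) : Int) := by
  induction gold with
  | nil => simp
  | cons x gold ih =>
    have hstep :
        ((PySem.Set.ofList sel).map (fun t => ((x :: gold).count t : Int))).sum
          = ((PySem.Set.ofList sel).map (fun t => (gold.count t : Int))).sum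
            + ((PySem.Set.ofList sel).map (fun t => if t == x then (1 : Int) else 0)).sum := by
      rw [← sum_map_add']
      apply congrArg
      apply List.map_congr_left
      intro t _
      by_cases h : t = x
      · subst h; simp
      · have h2 : x ≠ t := fun hh => h hh.symm
        simp [h2, h]
    rw [hstep, ih, sum_indicator_nodup _ _ (PySem.Set.nodup_ofList sel)]
    simp only [PySem.Set.mem_ofList, List.countP_cons]
    by_cases hx : x ∈ sel
    · simp [hx]
    · simp [hx]

-- B's per-question dictionary sum equals A's per-question membership count.
theorem row_count_eq (gold sel : List String) :
    (PySem.Set.ofList sel).foldl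
      (fun s tb => s + (gold.foldl (fun c t => c.insert t (c.getD t 0 + 1)) PySem.Dict.empty).getD tb 0) (0 : Int)
      = ((gold.countP sel.contains : Nat) : Int) := by
  rw [PySem.Dict.foldl_insert_getD_add_one_eq_counter, PySem.List.foldl_add]
  simp only [PySem.Dict.getD_counter, zero_add]
  exact counter_sum_eq_count gold sel

theorem main_equiv (g d t : List (List String))
    (h1 : g.length ≤ d.length) (h2 : g.length ≤ t.length) :
    perQuestionMetrics g d t = perQuestionMetrics_alt g d t := by
  unfold perQuestionMetrics perQuestionMetrics_alt
  simp only [PySem.List.foldl_append_singleton_eq_map, PySem.List.pyRange_zero_natCast,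
    List.map_map, List.nil_append, PySem.List.pyGet?_natCast, Function.comp_def,
    PySem.List.foldl_count_if, zero_add]
  apply List.ext_getElem
  · simp [PySem.List.length_enumerate]
  · intro i hA hB
    have hig : i < g.length := by simpa using hA
    have hid : i < d.length := lt_of_lt_of_le hig h1
    have hit : i < t.length := lt_of_lt_of_le hig h2
    simp only [List.getElem_map, List.getElem_range, PySem.List.getElem_enumerate]
    simp only [zero_add, PySem.List.pyGet?_natCast]
    rw [row_count_eq, row_count_eq]
    simp [hig, hid, hit]

-- ===== VERDICT (by name: the statement is the Claim_ definition above) =====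
theorem perQuestionMetrics_spec : Claim_equal_perQuestionMetrics := by
  intro g d t _ hpre
  unfold Spec_perQuestionMetrics
  exact main_equiv g d t hpre.1 hpre.2
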